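-- pv_equiv track=rewrite | github.com/j2noo/SJCE_Algorithm_Study | lujae/22주차/양과 늑대.py | get_cnt_in_visited
-- ===== SOURCE A (Python) =====
-- SHIP = 0
--
-- WOLF = 1
--
-- def get_cnt_in_visited(info, visited):
--     ship_cnt = 0
--     wolf_cnt = 0
--
--     for i in range(len(info)):
--         flag = info[i]
--
--         pos_bit = 1 << i
--
--         if flag == SHIP:
--             if visited & pos_bit == pos_bit:
--                 ship_cnt += 1
--         if flag == WOLF:
--             if visited & pos_bit == pos_bit:
--                 wolf_cnt += 1
--
--     return (ship_cnt, wolf_cnt)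
-- ===== SOURCE B (Python) =====
-- SHIP = 0
--
-- WOLF = 1
--
-- def get_cnt_in_visited(info, visited):
--     # Iterate only over the set bits of visited (restricted to info's index
--     # range): repeatedly extract the lowest set bit and classify the animal
--     # at that index, instead of scanning every index of info.
--     ship_cnt = 0
--     wolf_cnt = 0
--     v = visited & ((1 << len(info)) - 1)
--     while v:
--         low = v & -v
--         v -= low
--         flag = info[low.bit_length() - 1]
--         if flag == SHIP:
--             ship_cnt += 1
--         elif flag == WOLF:
--             wolf_cnt += 1
--     return (ship_cnt, wolf_cnt)
-- ===== Notes on version B (the rewrite author's own statement) =====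
-- stated objective: alternative
-- what changed: B masks visited to info's index range once and then loops only over the SET BITS of the mask (lowest-set-bit extraction v&-v, index recovered via bit_length), indexing into info, instead of A's scan over every index of info testing its bit.
import Mathlib
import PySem

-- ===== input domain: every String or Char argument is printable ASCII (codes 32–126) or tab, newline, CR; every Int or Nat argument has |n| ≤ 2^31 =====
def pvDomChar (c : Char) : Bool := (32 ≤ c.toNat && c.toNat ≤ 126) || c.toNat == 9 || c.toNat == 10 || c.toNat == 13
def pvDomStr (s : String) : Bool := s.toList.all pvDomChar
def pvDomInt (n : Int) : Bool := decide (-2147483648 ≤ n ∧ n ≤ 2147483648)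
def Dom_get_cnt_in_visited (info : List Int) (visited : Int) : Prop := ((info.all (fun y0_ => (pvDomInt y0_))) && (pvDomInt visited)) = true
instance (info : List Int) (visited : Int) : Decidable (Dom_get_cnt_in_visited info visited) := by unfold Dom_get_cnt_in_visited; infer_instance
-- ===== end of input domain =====

-- B masks visited to info's index range once and then loops only over the set
-- bits of the mask (lowest-set-bit extraction), instead of A's scan over every
-- index of info (objective: alternative algorithm; not claimed faster).

-- ===== PORT A =====
def get_cnt_in_visited (info : List Int) (visited : Int) : Int × Int :=
  (PySem.List.pyRange 0 (info.length : Int) 1).foldl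
    (fun (st : Int × Int) (i : Int) =>
      let flag := PySem.List.pyGetD info i 0
      -- i ranges over range(len(info)), so i ≥ 0 and `1 << i` is `1 <<< i.toNat`
      let pos_bit : Int := 1 <<< i.toNat
      let st := if flag = 0 then (if PySem.Int.band visited pos_bit = pos_bit then (st.1 + 1, st.2) else st) else st
      let st := if flag = 1 then (if PySem.Int.band visited pos_bit = pos_bit then (st.1, st.2 + 1) else st) else st
      st)
    (0, 0)

-- ===== PORT B =====
-- Termination helpers for B's while-loop (cited by name in decreasing_by).
-- band with a nonnegative (Nat-cast) right argument, negative left argument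
lemma pv_band_neg (v : Int) (hv : v < 0) (x : Nat) :
    PySem.Int.band v (x : Int) = ((x - (x &&& (-v - 1).toNat) : Nat) : Int) := by
  unfold PySem.Int.band
  rw [if_neg (by omega), if_pos (by positivity)]
  simp

-- v & -v for positive v, expressed over Nat
lemma pv_low_eq (v : Int) (h : 0 < v) :
    PySem.Int.band v (-v) = ((v.toNat - (v.toNat &&& (v.toNat - 1)) : Nat) : Int) := by
  have hvn : v = ((v.toNat : Nat) : Int) := by omega
  calc PySem.Int.band v (-v) = PySem.Int.band (-v) v := PySem.Int.band_comm _ _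
    _ = PySem.Int.band (-v) ((v.toNat : Nat) : Int) := by rw [← hvn]
    _ = ((v.toNat - (v.toNat &&& (-(-v) - 1).toNat) : Nat) : Int) := pv_band_neg (-v) (by omega) v.toNat
    _ = ((v.toNat - (v.toNat &&& (v.toNat - 1)) : Nat) : Int) := by
        have h1 : (-(-v) - 1).toNat = v.toNat - 1 := by omega
        rw [h1]

-- the loop variable strictly decreases: 1 ≤ (v & -v) ≤ v for v > 0
lemma pvB_dec (v : Int) (h : 0 < v) : (v - PySem.Int.band v (-v)).toNat < v.toNat := by
  rw [pv_low_eq v h]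
  have h1 : v.toNat &&& (v.toNat - 1) ≤ v.toNat - 1 := Nat.and_le_right
  have h2 : v.toNat &&& (v.toNat - 1) ≤ v.toNat := Nat.and_le_left
  omega

-- Python's `while v:` runs only while v > 0 here (the masked value is ≥ 0),
-- so the `0 < v` guard makes the same computation total.
def pvBLoop (info : List Int) (v : Int) (s w : Int) : Int × Int :=
  if _h : 0 < v then
    let low := PySem.Int.band v (-v)
    let flag := (PySem.List.pyGet? info ((PySem.Int.bitLength low : Int) - 1)).getD 0
    -- the index low.bit_length()-1 is always in range in Python; the default 0 is unreachable
    if flag = 0 then pvBLoop info (v - low) (s + 1) w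
    else if flag = 1 then pvBLoop info (v - low) s (w + 1)
    else pvBLoop info (v - low) s w
  else (s, w)
termination_by v.toNat
decreasing_by all_goals exact pvB_dec v _h

def get_cnt_in_visited_alt (info : List Int) (visited : Int) : Int × Int :=
  pvBLoop info (PySem.Int.band visited (((1 : Int) <<< info.length) - 1)) 0 0

-- ===== PRECONDITION & SPEC =====
def Spec_get_cnt_in_visited (info : List Int) (visited : Int) (out : Int × Int) : Prop := out = get_cnt_in_visited_alt info visited
instance (info : List Int) (visited : Int) (out : Int × Int) : Decidable (Spec_get_cnt_in_visited info visited out) := by unfold Spec_get_cnt_in_visited; infer_instance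

-- ===== CLAIM (what is proved, stated in full; the proofs are below) =====
def Claim_equal_get_cnt_in_visited : Prop := ∀ (info : List Int) (visited : Int), Dom_get_cnt_in_visited info visited → Spec_get_cnt_in_visited info visited (get_cnt_in_visited info visited)

-- ===== LEMMAS AND PROOFS =====

-- Python's test `visited & (1 << i) == (1 << i)` as a Bool
def pvBit (v : Int) (i : Nat) : Bool :=
  decide (PySem.Int.band v ((2 ^ i : Nat) : Int) = ((2 ^ i : Nat) : Int))

def pvCount (n : Nat) (p : Nat → Bool) : Nat :=
  ((Finset.range n).filter (fun i => p i = true)).card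

lemma pvCount_succ (n : Nat) (p : Nat → Bool) :
    pvCount (n + 1) p = pvCount n p + (if p n then 1 else 0) := by
  unfold pvCount
  rw [Finset.range_add_one, Finset.filter_insert]
  by_cases hp : p n = true
  · rw [if_pos hp, if_pos hp, Finset.card_insert_of_notMem (by simp)]
  · rw [if_neg hp, if_neg (by simpa using hp)]
    simp

lemma pvCount_congr (n : Nat) (p q : Nat → Bool) (h : ∀ i, i < n → p i = q i) :
    pvCount n p = pvCount n q := by
  unfold pvCount
  congr 1
  apply Finset.filter_congr
  intro i hi
  simp [h i (Finset.mem_range.mp hi)]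

-- A's loop body, re-indexed over Nat (proof helper)
def pvAStep (info : List Int) (v : Int) (st : Int × Int) (k : Nat) : Int × Int :=
  let flag := info.getD k 0
  let pos_bit : Int := ((2 ^ k : Nat) : Int)
  let st := if flag = 0 then (if PySem.Int.band v pos_bit = pos_bit then (st.1 + 1, st.2) else st) else st
  let st := if flag = 1 then (if PySem.Int.band v pos_bit = pos_bit then (st.1, st.2 + 1) else st) else st
  st

lemma pvA_eq (info : List Int) (v : Int) :
    get_cnt_in_visited info v = (List.range info.length).foldl (pvAStep info v) (0, 0) := by
  unfold get_cnt_in_visited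
  rw [PySem.List.pyRange_zero_natCast, List.foldl_map]
  congr 1
  funext st k
  simp [pvAStep, PySem.List.pyGetD_natCast, Int.shiftLeft_eq]

lemma pvA_fold (info : List Int) (v : Int) (n : Nat) (s w : Int) :
    (List.range n).foldl (pvAStep info v) (s, w) =
      (s + (pvCount n (fun i => pvBit v i && (info.getD i 0 == 0)) : Int),
       w + (pvCount n (fun i => pvBit v i && (info.getD i 0 == 1)) : Int)) := by
  induction n with
  | zero => simp [pvCount]
  | succ n ih =>
      rw [List.range_succ, List.foldl_append, List.foldl_cons, List.foldl_nil, ih,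
          pvCount_succ, pvCount_succ]
      unfold pvAStep pvBit
      by_cases h0 : info.getD n 0 = 0
      · by_cases hb : PySem.Int.band v ((2 ^ n : Nat) : Int) = ((2 ^ n : Nat) : Int)
        · simp only [h0, hb]
          norm_num
          ring_nf
        · simp only [h0, hb]
          norm_num
      · by_cases h1 : info.getD n 0 = 1
        · by_cases hb : PySem.Int.band v ((2 ^ n : Nat) : Int) = ((2 ^ n : Nat) : Int)
          · simp only [h1, hb]
            norm_num
            ring_nf
          · simp only [h1, hb]
            norm_num
        · simp only [h0, h1]
          norm_num
          exact ⟨fun _ => by simpa [List.getD] using h0, fun _ => by simpa [List.getD] using h1⟩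

lemma pvA_char (info : List Int) (v : Int) :
    get_cnt_in_visited info v =
      ((pvCount info.length (fun i => pvBit v i && (info.getD i 0 == 0)) : Int),
       (pvCount info.length (fun i => pvBit v i && (info.getD i 0 == 1)) : Int)) := by
  rw [pvA_eq, pvA_fold]
  simp

lemma pv_bit_decomp (x : Nat) : Nat.bit (x.testBit 0) (x / 2) = x := by
  rw [Nat.bit_val, Nat.testBit_zero]
  rcases Nat.mod_two_eq_zero_or_one x with h | h <;> simp [h] <;> omega

-- the low bit cleared: x & (x-1) removes exactly the lowest set bit
lemma pv_lowbit : ∀ x : Nat, 0 < x → ∃ i, x &&& (x - 1) = x - 2 ^ i ∧ x.testBit i = true := by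
  intro x
  induction x using Nat.strong_induction_on with
  | _ x ih =>
    intro hx
    rcases Nat.mod_two_eq_zero_or_one x with he | ho
    · -- x even, > 0: recurse on x/2
      have hx2 : 0 < x / 2 := by omega
      obtain ⟨i, hand, hbit⟩ := ih (x / 2) (by omega) hx2
      have hxb : x = Nat.bit false (x / 2) := by
        rw [Nat.bit_val]; simp; omega
      have hx1b : x - 1 = Nat.bit true (x / 2 - 1) := by
        rw [Nat.bit_val]; simp; omega
      refine ⟨i + 1, ?_, ?_⟩
      · have key : Nat.bit false (x / 2) &&& Nat.bit true (x / 2 - 1) =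
            Nat.bit (false && true) ((x / 2) &&& (x / 2 - 1)) := Nat.land_bit ..
        rw [← hxb, ← hx1b] at key
        rw [key, hand, Nat.bit_val]
        have hle : 2 ^ i ≤ x / 2 := by
          have := Nat.ge_two_pow_of_testBit hbit
          omega
        simp only [Bool.false_and, Bool.toNat_false]
        have hpow : (2 : Nat) ^ (i + 1) = 2 ^ i * 2 := pow_succ 2 i
        omega
      · rw [Nat.testBit_add_one]
        exact hbit
    · -- x odd: lowest bit is bit 0
      refine ⟨0, ?_, ?_⟩
      · have hxb : x = Nat.bit true (x / 2) := by
          rw [Nat.bit_val]; simp; omega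
        have hx1b : x - 1 = Nat.bit false (x / 2) := by
          rw [Nat.bit_val]; simp; omega
        have key : Nat.bit true (x / 2) &&& Nat.bit false (x / 2) =
            Nat.bit (true && false) ((x / 2) &&& (x / 2)) := Nat.land_bit ..
        rw [← hxb, ← hx1b] at key
        rw [key, Nat.and_self, Nat.bit_val]
        simp
        omega
      · rw [Nat.testBit_zero]
        simp [ho]

-- subtracting a set bit equals xor with it
lemma pv_sub_two_pow_eq_xor : ∀ i N : Nat, N.testBit i = true → N - 2 ^ i = N ^^^ 2 ^ i := by
  intro i
  induction i with
  | zero =>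
      intro N h
      rw [Nat.testBit_zero] at h
      have hodd : N % 2 = 1 := by simpa using h
      have hN : N = Nat.bit true (N / 2) := by rw [Nat.bit_val]; simp; omega
      have h1 : (1 : Nat) = Nat.bit true 0 := by decide
      calc N - 2 ^ 0 = N - 1 := by norm_num
        _ = 2 * (N / 2) := by omega
        _ = Nat.bit (true ^^ true) (N / 2 ^^^ 0) := by
            rw [Nat.bit_val]; simp
        _ = Nat.bit true (N / 2) ^^^ Nat.bit true 0 := by rw [Nat.xor_bit]
        _ = N ^^^ 2 ^ 0 := by rw [← hN, ← h1]; norm_num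
  | succ i ihi =>
      intro N h
      rw [Nat.testBit_add_one] at h
      have hle : 2 ^ i ≤ N / 2 := Nat.ge_two_pow_of_testBit h
      have hN : N = Nat.bit (N.testBit 0) (N / 2) := (pv_bit_decomp N).symm
      have hp : (2 : Nat) ^ (i + 1) = Nat.bit false (2 ^ i) := by
        rw [Nat.bit_val]
        simp [pow_succ]
        ring
      calc N - 2 ^ (i + 1)
          = 2 * (N / 2 - 2 ^ i) + (N.testBit 0).toNat := by
            have hNv := pv_bit_decomp N
            rw [Nat.bit_val] at hNv
            have hpow : (2 : Nat) ^ (i + 1) = 2 * 2 ^ i := by rw [pow_succ]; ring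
            omega
        _ = Nat.bit (N.testBit 0 ^^ false) (N / 2 ^^^ 2 ^ i) := by
            rw [← ihi (N / 2) h, Nat.bit_val]
            simp
        _ = Nat.bit (N.testBit 0) (N / 2) ^^^ Nat.bit false (2 ^ i) := by rw [Nat.xor_bit]
        _ = N ^^^ 2 ^ (i + 1) := by rw [← hN, ← hp]

lemma pv_sub_two_pow_testBit (N i : Nat) (h : N.testBit i = true) (j : Nat) :
    (N - 2 ^ i).testBit j = (N.testBit j && !(decide (j = i))) := by
  rw [pv_sub_two_pow_eq_xor i N h, Nat.testBit_xor, Nat.testBit_two_pow]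
  by_cases hj : j = i
  · subst hj; simp [h]
  · simp [hj, Ne.symm hj]

-- counting set bits restricted by a predicate: removing bit i removes one count
lemma pv_count_step (n i : Nat) (hi : i < n) (N N' : Nat)
    (hbits : ∀ j, N'.testBit j = (N.testBit j && !(decide (j = i))))
    (hN : N.testBit i = true) (c : Nat → Bool) :
    pvCount n (fun j => N.testBit j && c j) =
      pvCount n (fun j => N'.testBit j && c j) + (if c i then 1 else 0) := by
  unfold pvCount
  by_cases hc : c i = true
  · rw [if_pos hc]
    have hset : (Finset.range n).filter (fun j => (N.testBit j && c j) = true) =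
        insert i ((Finset.range n).filter (fun j => (N'.testBit j && c j) = true)) := by
      ext j
      simp only [Finset.mem_filter, Finset.mem_insert, Finset.mem_range, hbits]
      constructor
      · rintro ⟨hjn, hj⟩
        by_cases hji : j = i
        · exact Or.inl hji
        · refine Or.inr ⟨hjn, ?_⟩
          simp only [Bool.and_eq_true] at hj ⊢
          simp [hj.1, hj.2, hji]
      · rintro (hji | ⟨hjn, hj⟩)
        · subst hji; exact ⟨hi, by simp [hN, hc]⟩
        · simp only [Bool.and_eq_true, Bool.not_eq_true'] at hj
          exact ⟨hjn, by simp [hj.1.1, hj.2]⟩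
    rw [hset, Finset.card_insert_of_notMem (by simp [hbits])]
  · rw [if_neg hc]
    have hc' : c i = false := by simpa using hc
    have hset : (Finset.range n).filter (fun j => (N.testBit j && c j) = true) =
        (Finset.range n).filter (fun j => (N'.testBit j && c j) = true) := by
      ext j
      simp only [Finset.mem_filter, Finset.mem_range, hbits]
      by_cases hji : j = i
      · subst hji; simp [hc']
      · simp [hji]
    rw [hset]
    simp

lemma pv_bitLength_pow (i : Nat) : PySem.Int.bitLength ((2 ^ i : Nat) : Int) = i + 1 := by
  induction i with
  | zero => decide
  | succ i ih =>
      rw [PySem.Int.bitLength_natCast (by positivity)]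
      have : (2 : Nat) ^ (i + 1) / 2 = 2 ^ i := by
        rw [pow_succ]; omega
      rw [this, ih]

-- B's loop counts, over the bit positions of its nonnegative argument
lemma pvB_fold (info : List Int) : ∀ N : Nat, (∀ j, N.testBit j = true → j < info.length) →
    ∀ s w : Int, pvBLoop info (N : Int) s w =
      (s + (pvCount info.length (fun i => N.testBit i && (info.getD i 0 == 0)) : Int),
       w + (pvCount info.length (fun i => N.testBit i && (info.getD i 0 == 1)) : Int)) := by
  intro N
  induction N using Nat.strong_induction_on with
  | _ N ih =>
    intro hrange s w
    rcases Nat.eq_zero_or_pos N with h0 | hpos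
    · subst h0
      rw [pvBLoop]
      rw [dif_neg (by omega)]
      have hz : ∀ c : Nat → Bool, pvCount info.length (fun i => Nat.testBit 0 i && c i) = 0 := by
        intro c
        unfold pvCount
        rw [Finset.card_eq_zero]
        ext j
        simp
      push_cast [hz]
      simp
    · obtain ⟨i, hand, hbit⟩ := pv_lowbit N hpos
      have hile : 2 ^ i ≤ N := Nat.ge_two_pow_of_testBit hbit
      have hin : i < info.length := hrange i hbit
      have hlow : PySem.Int.band ((N : Nat) : Int) (-((N : Nat) : Int)) = ((2 ^ i : Nat) : Int) := by
        have key : N - (N &&& (N - 1)) = 2 ^ i := by rw [hand, Nat.sub_sub_self hile]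
        rw [pv_low_eq _ (by exact_mod_cast hpos), Int.toNat_natCast, key]
      have hidx : ((PySem.Int.bitLength ((2 ^ i : Nat) : Int) : Int) - 1) = ((i : Nat) : Int) := by
        rw [pv_bitLength_pow]
        push_cast
        ring
      have hget : (PySem.List.pyGet? info ((i : Nat) : Int)).getD 0 = info.getD i 0 := by
        rw [PySem.List.pyGet?_natCast]
        rcases Nat.lt_or_ge i info.length with h | h
        · rw [List.getElem?_eq_getElem h]
          simp [List.getD, List.getElem?_eq_getElem h]
        · omega
      set N' := N - 2 ^ i with hN'
      have hbits : ∀ j, N'.testBit j = (N.testBit j && !(decide (j = i))) :=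
        pv_sub_two_pow_testBit N i hbit
      have hrange' : ∀ j, N'.testBit j = true → j < info.length := by
        intro j hj
        rw [hbits j] at hj
        simp only [Bool.and_eq_true] at hj
        exact hrange j hj.1
      have hsub : ((N : Nat) : Int) - ((2 ^ i : Nat) : Int) = ((N' : Nat) : Int) := by
        simp only [hN']
        exact (Nat.cast_sub hile).symm
      have hlt : N' < N := by
        have : 0 < 2 ^ i := by positivity
        omega
      have hc0 := pv_count_step info.length i hin N N' hbits hbit (fun j => info.getD j 0 == 0)
      have hc1 := pv_count_step info.length i hin N N' hbits hbit (fun j => info.getD j 0 == 1)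
      rw [pvBLoop, dif_pos (by exact_mod_cast hpos)]
      simp only [hlow, hidx, hget, hsub]
      by_cases h0 : info.getD i 0 = 0
      · rw [if_pos h0, ih N' hlt hrange']
        rw [hc0, hc1]
        simp only [h0]
        norm_num
        ring
      · by_cases h1 : info.getD i 0 = 1
        · rw [if_neg h0, if_pos h1, ih N' hlt hrange']
          rw [hc0, hc1]
          simp only [h1]
          norm_num
          ring
        · rw [if_neg h0, if_neg h1, ih N' hlt hrange']
          rw [hc0, hc1]
          have e0 : (info.getD i 0 == 0) = false := beq_eq_false_iff_ne.mpr h0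
          have e1 : (info.getD i 0 == 1) = false := beq_eq_false_iff_ne.mpr h1
          rw [e0, e1]
          norm_num

-- subtracting the common bits equals xor: a - (a & c) = a ^^^ (a & c)
lemma pv_sub_and_eq_xor : ∀ a c : Nat, a - (a &&& c) = a ^^^ (a &&& c) := by
  intro a
  induction a using Nat.strong_induction_on with
  | _ a ih =>
    intro c
    rcases Nat.eq_zero_or_pos a with h0 | hpos
    · subst h0; simp
    · have ha : a = Nat.bit (a.testBit 0) (a / 2) := (pv_bit_decomp a).symm
      have hcb : c = Nat.bit (c.testBit 0) (c / 2) := (pv_bit_decomp c).symm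
      have hand : a &&& c = Nat.bit (a.testBit 0 && c.testBit 0) (a / 2 &&& c / 2) := by
        conv_lhs => rw [ha, hcb]
        rw [Nat.land_bit]
      have hxor : a ^^^ (a &&& c) =
          Nat.bit (a.testBit 0 ^^ (a.testBit 0 && c.testBit 0)) ((a / 2) ^^^ (a / 2 &&& c / 2)) := by
        have key : Nat.bit (a.testBit 0) (a / 2) ^^^
            Nat.bit (a.testBit 0 && c.testBit 0) (a / 2 &&& c / 2) =
            Nat.bit (a.testBit 0 ^^ (a.testBit 0 && c.testBit 0)) ((a / 2) ^^^ (a / 2 &&& c / 2)) :=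
          Nat.xor_bit ..
        rw [← hand, ← ha] at key
        exact key
      have hih := ih (a / 2) (by omega) (c / 2)
      have hle2 : a / 2 &&& c / 2 ≤ a / 2 := Nat.and_le_left
      have hb : (a.testBit 0 ^^ (a.testBit 0 && c.testBit 0)).toNat =
          (a.testBit 0).toNat - (a.testBit 0 && c.testBit 0).toNat := by
        cases a.testBit 0 <;> cases c.testBit 0 <;> decide
      have hbla : (a.testBit 0 && c.testBit 0).toNat ≤ (a.testBit 0).toNat := by
        cases a.testBit 0 <;> cases c.testBit 0 <;> decide
      have haval : a = 2 * (a / 2) + (a.testBit 0).toNat := by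
        conv_lhs => rw [ha]
        rw [Nat.bit_val]
      have handval : a &&& c = 2 * (a / 2 &&& c / 2) + (a.testBit 0 && c.testBit 0).toNat := by
        rw [hand, Nat.bit_val]
      have hxorval : a ^^^ (a &&& c) =
          2 * ((a / 2) ^^^ (a / 2 &&& c / 2)) + (a.testBit 0 ^^ (a.testBit 0 && c.testBit 0)).toNat := by
        rw [hxor, Nat.bit_val]
      rw [hxorval, ← hih, hb]
      omega

-- bits of the masked value: visited & ((1 << n) - 1)
lemma pv_mask (v : Int) (n : Nat) :
    ∃ N : Nat, PySem.Int.band v (((1 : Int) <<< n) - 1) = ((N : Nat) : Int) ∧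
      ∀ j, N.testBit j = (decide (j < n) && pvBit v j) := by
  have hm : ((1 : Int) <<< n) - 1 = ((2 ^ n - 1 : Nat) : Int) := by
    rw [Int.shiftLeft_eq, one_mul, Nat.cast_sub Nat.one_le_two_pow]
    push_cast
    ring
  rcases le_or_gt 0 v with hv | hv
  · refine ⟨v.toNat &&& (2 ^ n - 1), ?_, ?_⟩
    · rw [hm, PySem.Int.band_of_nonneg hv (by positivity), Int.toNat_natCast]
    · intro j
      rw [Nat.testBit_and, Nat.testBit_two_pow_sub_one]
      have hbit : pvBit v j = v.toNat.testBit j := by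
        unfold pvBit
        rw [PySem.Int.band_of_nonneg hv (by positivity), Int.toNat_natCast, Nat.and_two_pow]
        cases hb : v.toNat.testBit j
        · simp only [Bool.toNat_false, Nat.zero_mul]
          rw [decide_eq_false]
          intro hcontra
          have hz : (0 : Nat) = 2 ^ j := by exact_mod_cast hcontra
          have hp2 : 0 < (2 : Nat) ^ j := by positivity
          omega
        · simp
      rw [hbit, Bool.and_comm]
  · set c := (-v - 1).toNat with hc
    refine ⟨(2 ^ n - 1) - ((2 ^ n - 1) &&& c), ?_, ?_⟩
    · rw [hm, pv_band_neg v hv]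
    · intro j
      have hand : (2 ^ n - 1) &&& ((2 ^ n - 1) &&& c) = (2 ^ n - 1) &&& c := by
        rw [← Nat.and_assoc, Nat.and_self]
      -- (a - (a & c)) = a ^^^ (a & c) bitwise, via repeated single-bit removal:
      -- here prove testBit directly by strong induction packaged in a helper
      have hbit : ∀ j, ((2 ^ n - 1) - ((2 ^ n - 1) &&& c)).testBit j =
          ((2 ^ n - 1).testBit j && !c.testBit j) := by
        intro j
        rw [pv_sub_and_eq_xor (2 ^ n - 1) c, Nat.testBit_xor, Nat.testBit_and]
        cases ha : (2 ^ n - 1).testBit j <;> cases hcb : c.testBit j <;> simp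
      rw [hbit j, Nat.testBit_two_pow_sub_one]
      have hpv : pvBit v j = !c.testBit j := by
        unfold pvBit
        rw [pv_band_neg v hv, ← hc]
        have h2c : 2 ^ j &&& c = (c.testBit j).toNat * 2 ^ j := by
          rw [Nat.and_comm]; exact Nat.and_two_pow c j
        cases hb : c.testBit j
        · rw [h2c, hb]
          simp
        · rw [h2c, hb]
          simp only [Bool.toNat_true, Nat.one_mul, Nat.sub_self, Nat.cast_zero, Bool.not_true]
          rw [decide_eq_false]
          intro hcontra
          have hz : (0 : Nat) = 2 ^ j := by exact_mod_cast hcontra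
          have hp2 : 0 < (2 : Nat) ^ j := by positivity
          omega
      rw [hpv]

lemma pv_main (info : List Int) (v : Int) :
    get_cnt_in_visited info v = get_cnt_in_visited_alt info v := by
  obtain ⟨N, hN, hbits⟩ := pv_mask v info.length
  unfold get_cnt_in_visited_alt
  rw [hN]
  have hrange : ∀ j, N.testBit j = true → j < info.length := by
    intro j hj
    rw [hbits j] at hj
    simp only [Bool.and_eq_true, decide_eq_true_eq] at hj
    exact hj.1
  rw [pvB_fold info N hrange 0 0, pvA_char]
  have hcong : ∀ c : Nat → Bool,
      pvCount info.length (fun i => pvBit v i && c i) =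
        pvCount info.length (fun i => N.testBit i && c i) := by
    intro c
    apply pvCount_congr
    intro i hi
    rw [hbits i]
    simp [hi]
  rw [hcong, hcong]
  simp

-- ===== VERDICT (by name: the statement is the Claim_ definition above) =====
theorem get_cnt_in_visited_spec : Claim_equal_get_cnt_in_visited := by
  intro info visited _
  unfold Spec_get_cnt_in_visited
  exact pv_main info visited
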